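-- pv_equiv track=rewrite | github.com/hersil94/Asignaci-n-de-salas-y-horarios | Hernan Silva - salas y horarios.py | calcularPrioridad
-- ===== SOURCE A (Python) =====
-- def calcularModa(demanda):
--     contadorModal=0 #es la frecuencia del elemento con mas apariciones actualmente
--     modas=[]
--
--     for ramo in demanda: #para cada ramo
--         conteo=demanda.count(ramo) #se cuenta cuantas veces aparece en la lista
--         if conteo> contadorModal: #si la frecuencia del elemento actual supera al que hasta ese punto tenía mayor frecuencia
--             contadorModal=conteo #contadorModal se sobreescribe con la nueva mayor frecuencia
--
--     for ramo in demanda:#se cuentan las apariciones de cada ramo nuevamente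
--         conteo=demanda.count(ramo)
--         if conteo==contadorModal and ramo not in modas: #si durante el conteo algún elemento tiene la misma frecuencia que el contadorModal
--             modas.append(ramo) #ese elemento es la moda y se agrega a la lista de modas, es válida para modas únicas y no únicas
--
--     return modas
--
-- def calcularPrioridad(lista):
--     largoDemanda=len(lista)#se toma en cuenta el largo de la lista para poner la condición de borde
--     lista2=[]
--
--     prioridad=[]
--     modas=[]
--     contadorModal=0
--     i=0
--
--         #se duplica la lista de entrada para trabajar con la copia
--         #ya que mas adelante se borran elementos de esta
--         #esto traía problemas cuando se requería la lista para otras funciones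
--     for elemento in lista:
--         lista2.append(elemento)
--
--
--         #se calcula la moda en bucle, ya que la lista de demanda irá variando
--         #la moda es una lista con los elementos que tengan mayor frecuencia
--     while i < largoDemanda:
--         moda=calcularModa(lista2)
--
--
--
--         #se agregan los elementos de la lista moda a la lista de prioridad
--         for ramo in moda:
--             prioridad.append(ramo)
--
--
--
--         #para cada ramo, si este ya está incluido en la lista de prioridad
--         #se elimina de la lista2 (demanda)
--         #se repite el proceso con una lista2 cada vez mas pequeña
--         #hasta incluir todos los ramos demandados en la prioridad
--         #según su moda
--         for ramo in moda:
--             if ramo in lista2: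
--                 lista2.remove(ramo)
--
--
--         #la función tiene un problema
--         #se elimina solo una frecuencia, hay que hacer un ajuste
--         #por ejemplo, para un elemento que se repita 3 veces en la demanda
--         #se elimina solo una vez y la siguiente vez ese elemento
--         #continúa repitiéndose 2 veces e influye en el cálculo de la moda
--
--
--         i=i+1 #se avanza al siguiente valor de la demanda para repetir el proceso las veces que haga falta
--
--     return prioridad
-- ===== SOURCE B (Python) =====
-- def calcularPrioridad(lista):
--     # One reverse pass labels each occurrence with its rank from the end (1 = last
--     # occurrence of its value); the occurrence of rank r is exactly the one A emits
--     # in the peeling round of level r, so the answer is the levels M..1 read off the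
--     # unchanged input, no mode recomputation and no list surgery.
--     rank = {}
--     j = []
--     for x in reversed(lista):
--         r = rank.get(x, 0) + 1
--         rank[x] = r
--         j.append(r)
--     j.reverse()
--     res = []
--     for level in range(max(rank.values(), default=0), 0, -1):
--         res += [x for r, x in zip(j, lista) if r == level]
--     return res
-- ===== Notes on version B (the rewrite author's own statement) =====
-- stated objective: faster
-- what changed: Replaces A's n peeling rounds (each recomputing modes with repeated .count scans and removing first occurrences from a shrinking copy) by a single reverse pass that labels every occurrence with its rank from the end, then emits levels M..1 by scanning the unchanged input; no mode computation and no removals.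
import Mathlib
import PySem

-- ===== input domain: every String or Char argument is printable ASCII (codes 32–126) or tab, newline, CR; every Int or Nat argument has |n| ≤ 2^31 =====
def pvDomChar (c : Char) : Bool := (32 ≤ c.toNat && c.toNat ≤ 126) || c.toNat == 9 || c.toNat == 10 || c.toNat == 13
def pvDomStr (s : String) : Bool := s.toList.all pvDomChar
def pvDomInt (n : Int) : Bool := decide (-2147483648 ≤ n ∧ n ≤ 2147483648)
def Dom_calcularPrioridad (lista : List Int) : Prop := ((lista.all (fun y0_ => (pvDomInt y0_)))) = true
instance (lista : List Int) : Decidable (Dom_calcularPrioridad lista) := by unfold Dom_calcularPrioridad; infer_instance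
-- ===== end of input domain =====

-- B replaces A's n peeling rounds (mode recomputation + removals from a shrinking copy)
-- by one reverse pass of from-the-end occurrence ranks read off level by level (objective: faster).

-- ===== PORT A =====
-- literal port of calcularModa: running max of demanda.count(ramo), then a second
-- pass appending first occurrences whose count equals the max
def calcularModa (demanda : List Int) : List Int :=
  let contadorModal : Int := demanda.foldl (fun contadorModal ramo =>
    let conteo : Int := (PySem.List.count demanda ramo : Int)
    if conteo > contadorModal then conteo else contadorModal) 0
  demanda.foldl (fun modas ramo =>
    let conteo : Int := (PySem.List.count demanda ramo : Int)
    if conteo = contadorModal ∧ ramo ∉ modas then modas ++ [ramo] else modas) ([] : List Int)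

-- the 'while i < largoDemanda' loop with i = 0, i += 1 runs largoDemanda times
def calcularPrioridad (lista : List Int) : List Int :=
  let largoDemanda := lista.length
  let lista2 := lista.foldl (fun lista2 elemento => lista2 ++ [elemento]) ([] : List Int)
  ((List.range largoDemanda).foldl (fun (st : List Int × List Int) _ =>
    let moda := calcularModa st.2
    let prioridad := moda.foldl (fun prioridad ramo => prioridad ++ [ramo]) st.1
    -- 'if ramo in lista2: lista2.remove(ramo)': remove? is some under the guard, so getD is exact
    let lista2 := moda.foldl (fun lista2 ramo =>
      if ramo ∈ lista2 then (PySem.List.remove? lista2 ramo).getD lista2 else lista2) st.2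
    (prioridad, lista2)) (([] : List Int), lista2)).1

-- ===== PORT B =====
-- one pass over reversed(lista) building the rank dict and the rank list j (then reversed),
-- then levels max..1 read off zip(j, lista) by a filtered scan
def calcularPrioridad_alt (lista : List Int) : List Int :=
  let st := lista.reverse.foldl (fun (st : PySem.Dict Int Int × List Int) x =>
    let r := st.1.getD x 0 + 1
    (st.1.insert x r, st.2 ++ [r])) ((PySem.Dict.empty : PySem.Dict Int Int), ([] : List Int))
  let j := st.2.reverse
  (PySem.List.pyRange ((PySem.List.max? st.1.values (fun v => v)).getD 0) 0 (-1)).foldl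
    (fun res level =>
      res ++ ((List.zip j lista).filter (fun p => p.1 == level)).map Prod.snd) ([] : List Int)

-- ===== PRECONDITION & SPEC =====
def Spec_calcularPrioridad (lista : List Int) (out : List Int) : Prop := out = calcularPrioridad_alt lista
instance (lista : List Int) (out : List Int) : Decidable (Spec_calcularPrioridad lista out) := by unfold Spec_calcularPrioridad; infer_instance

-- ===== CLAIM (what is proved, stated in full; the proofs are below) =====
def Claim_equal_calcularPrioridad : Prop := ∀ (lista : List Int), Dom_calcularPrioridad lista → Spec_calcularPrioridad lista (calcularPrioridad lista)

-- ===== LEMMAS AND PROOFS =====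

-- rank of each occurrence counted from the END of the list (last occurrence of a value has rank 1)
def ranks : List Int → List Int
  | [] => []
  | x :: xs => ((xs.count x + 1 : Nat) : Int) :: ranks xs

-- [n, n-1, …, 1]
def descList : Nat → List Int
  | 0 => []
  | n + 1 => ((n + 1 : Nat) : Int) :: descList n

-- the occurrences of rank m, left to right
def levelList (m : Int) (l : List Int) : List Int :=
  ((List.zip (ranks l) l).filter (fun p => p.1 == m)).map Prod.snd

-- the largest multiplicity in l
def maxCount (l : List Int) : Nat := (l.map (fun x => l.count x)).foldl max 0

-- canonical common value of both programs
def peelCat (l : List Int) : List Int :=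
  (descList (maxCount l)).flatMap (fun m => levelList m l)

theorem natFoldlMax_le (ns : List Nat) : ∀ (a k : Nat), (∀ n ∈ ns, n ≤ k) → a ≤ k →
    ns.foldl max a ≤ k := by
  induction ns with
  | nil => intro a k _ ha; simpa using ha
  | cons n t ih =>
    intro a k h ha
    exact ih _ _ (fun x hx => h x (List.mem_cons_of_mem _ hx))
      (max_le ha (h n (List.mem_cons_self)))

theorem le_natFoldlMax (ns : List Nat) : ∀ (a : Nat), a ≤ ns.foldl max a ∧ ∀ n ∈ ns, n ≤ ns.foldl max a := by
  induction ns with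
  | nil => intro a; simp
  | cons n t ih =>
    intro a
    obtain ⟨h1, h2⟩ := ih (max a n)
    refine ⟨le_trans (le_max_left _ _) h1, ?_⟩
    intro x hx
    rcases List.mem_cons.mp hx with rfl | hx
    · exact le_trans (le_max_right _ _) h1
    · exact h2 x hx

theorem natFoldlMax_mem (ns : List Nat) : ∀ (a : Nat), ns.foldl max a ∈ a :: ns := by
  induction ns with
  | nil => intro a; simp
  | cons n t ih =>
    intro a
    rcases List.mem_cons.mp (ih (max a n)) with h | h
    · simp only [List.foldl_cons]
      rcases max_choice a n with hm | hm <;> rw [h, hm]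
      · exact List.mem_cons_self
      · exact List.mem_cons_of_mem _ List.mem_cons_self
    · exact List.mem_cons_of_mem _ (List.mem_cons_of_mem _ h)

theorem count_le_maxCount (l : List Int) (x : Int) (hx : x ∈ l) : l.count x ≤ maxCount l :=
  (le_natFoldlMax _ 0).2 _ (List.mem_map_of_mem hx)

theorem maxCount_le (l : List Int) (k : Nat) (h : ∀ x ∈ l, l.count x ≤ k) : maxCount l ≤ k := by
  apply natFoldlMax_le
  · intro n hn
    obtain ⟨x, hx, rfl⟩ := List.mem_map.mp hn
    exact h x hx
  · exact Nat.zero_le _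

theorem maxCount_attained (l : List Int) (hl : l ≠ []) : ∃ x ∈ l, l.count x = maxCount l := by
  rcases List.mem_cons.mp (natFoldlMax_mem (l.map (fun x => l.count x)) 0) with h | h
  · exfalso
    obtain ⟨y, hy⟩ := List.exists_mem_of_ne_nil l hl
    have h1 : 1 ≤ l.count y := List.one_le_count_iff.mpr hy
    have h2 : l.count y ≤ maxCount l := count_le_maxCount l y hy
    have : maxCount l = 0 := by unfold maxCount; omega
    omega
  · obtain ⟨x, hx, hc⟩ := List.mem_map.mp h
    exact ⟨x, hx, hc⟩

theorem maxCount_pos (l : List Int) (hl : l ≠ []) : 1 ≤ maxCount l := by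
  obtain ⟨y, hy⟩ := List.exists_mem_of_ne_nil l hl
  exact le_trans (List.one_le_count_iff.mpr hy) (count_le_maxCount l y hy)

theorem maxCount_reverse (l : List Int) : maxCount l.reverse = maxCount l := by
  apply le_antisymm
  · apply maxCount_le
    intro x hx
    rw [List.count_reverse]
    exact count_le_maxCount l x (List.mem_reverse.mp hx)
  · apply maxCount_le
    intro x hx
    rw [← List.count_reverse (l := l)]
    exact count_le_maxCount l.reverse x (List.mem_reverse.mpr hx)

theorem mem_descList (n : Nat) (x : Int) : x ∈ descList n ↔ 1 ≤ x ∧ x ≤ (n : Int) := by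
  induction n with
  | zero => simp [descList]; omega
  | succ k ih =>
    simp only [descList, List.mem_cons, ih]
    push_cast
    omega

theorem descList_eq_map (n : Nat) : descList n = (List.range n).map (fun k => (n : Int) - (k : Nat)) := by
  induction n with
  | zero => simp [descList]
  | succ k ih =>
    rw [descList, ih, List.range_succ_eq_map, List.map_cons, List.map_map]
    refine congrArg₂ _ (by push_cast; ring) ?_
    apply List.map_congr_left
    intro j _
    simp only [Function.comp_apply]
    push_cast
    ring

theorem pyRange_downto (n : Nat) : PySem.List.pyRange (n : Int) 0 (-1) = descList n := by
  rcases Nat.eq_zero_or_pos n with rfl | hn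
  · rfl
  · rw [descList_eq_map]
    unfold PySem.List.pyRange
    rw [if_neg (show ¬(-1 : Int) = 0 by norm_num)]
    rw [if_neg (show ¬(0 : Int) < -1 by norm_num)]
    rw [if_pos (show (0 : Int) < (n : Int) by exact_mod_cast hn)]
    have hc : (((n : Int) - 0 + - (-1) - 1) / - (-1)).toNat = n := by norm_num
    rw [hc]
    apply List.map_congr_left
    intro j _
    ring

theorem castFoldlMax (l : List Int) (f : Int → Nat) : ∀ (a : Nat),
    ((l.foldl (fun acc x => max acc (f x)) a : Nat) : Int)
    = l.foldl (fun acc x => max acc ((f x : Nat) : Int)) (a : Int) := by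
  induction l with
  | nil => intro a; rfl
  | cons x t ih =>
    intro a
    simp only [List.foldl_cons]
    rw [ih (max a (f x)), Nat.cast_max]

-- A's running-max loop computes the maximal multiplicity
theorem runmax_eq (l : List Int) :
    l.foldl (fun contadorModal ramo =>
      let conteo : Int := (PySem.List.count l ramo : Int)
      if conteo > contadorModal then conteo else contadorModal) 0 = (maxCount l : Int) := by
  have h1 : l.foldl (fun contadorModal ramo =>
      let conteo : Int := (PySem.List.count l ramo : Int)
      if conteo > contadorModal then conteo else contadorModal) 0
      = l.foldl (fun acc x => max acc ((List.count x l : Nat) : Int)) 0 := by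
    apply PySem.List.foldl_congr_mem
    intro acc x hx
    simp only [PySem.List.count_eq]
    rcases le_or_gt ((List.count x l : Nat) : Int) acc with h | h
    · simp [not_lt.mpr h, max_eq_left h]
    · simp [h, max_eq_right (le_of_lt h)]
  have h2 : maxCount l = l.foldl (fun acc x => max acc (l.count x)) 0 := List.foldl_map
  rw [h1, h2, castFoldlMax l (fun x => l.count x) 0]
  rfl

theorem pv_dedup_fold (p : Int → Prop) [DecidablePred p] :
    ∀ (l s : List Int),
      l.foldl (fun acc x => if p x ∧ x ∉ acc then acc ++ [x] else acc)
        ((PySem.Set.ofList s).filter (fun x => decide (p x)))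
      = (PySem.Set.ofList (s ++ l)).filter (fun x => decide (p x)) := by
  intro l
  induction l with
  | nil => intro s; simp
  | cons x t ih =>
    intro s
    have hofl : PySem.Set.ofList (s ++ [x]) = PySem.Set.add (PySem.Set.ofList s) x := by
      rw [PySem.Set.ofList_eq_foldl, PySem.Set.ofList_eq_foldl, List.foldl_append]
      rfl
    have hstep : (if p x ∧ x ∉ (PySem.Set.ofList s).filter (fun y => decide (p y)) then
          ((PySem.Set.ofList s).filter (fun y => decide (p y))) ++ [x]
        else (PySem.Set.ofList s).filter (fun y => decide (p y)))
        = (PySem.Set.ofList (s ++ [x])).filter (fun y => decide (p y)) := by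
      rw [hofl]
      by_cases hx : x ∈ PySem.Set.ofList s
      · have hadd : PySem.Set.add (PySem.Set.ofList s) x = PySem.Set.ofList s := by
          simp [PySem.Set.add, PySem.Set.contains, hx]
        rw [hadd]
        by_cases hp : p x
        · have : x ∈ (PySem.Set.ofList s).filter (fun y => decide (p y)) :=
            List.mem_filter.mpr ⟨hx, by simpa using hp⟩
          simp [this]
        · simp [hp]
      · have hadd : PySem.Set.add (PySem.Set.ofList s) x = PySem.Set.ofList s ++ [x] := by
          simp [PySem.Set.add, PySem.Set.contains, hx]
        rw [hadd, List.filter_append]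
        by_cases hp : p x
        · have hnin : x ∉ (PySem.Set.ofList s).filter (fun y => decide (p y)) :=
            fun h => hx (List.mem_filter.mp h).1
          simp [hp, hnin]
        · simp [hp]
    rw [List.foldl_cons, hstep, ih (s ++ [x])]
    simp

-- A's dedup pass computes the distinct elements of count m, in first-occurrence order
theorem modaOfList (l : List Int) :
    calcularModa l
    = (PySem.Set.ofList l).filter (fun x => decide (((l.count x : Nat) : Int) = (maxCount l : Int))) := by
  unfold calcularModa
  rw [runmax_eq]
  simp only [PySem.List.count_eq]
  have hA := pv_dedup_fold
    (fun x => ((List.count x l : Nat) : Int) = (maxCount l : Int)) l []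
  simp only [List.nil_append] at hA
  have hinit : ((PySem.Set.ofList ([] : List Int)).filter
      (fun x => decide (((List.count x l : Nat) : Int) = (maxCount l : Int)))) = [] := rfl
  rw [hinit] at hA
  exact hA

theorem ofList_foldl_add : ∀ (xs s : List Int),
    List.foldl PySem.Set.add s xs = s ++ (PySem.Set.ofList xs).filter (fun y => decide (y ∉ s)) := by
  intro xs
  induction xs with
  | nil => intro s; simp [PySem.Set.ofList]
  | cons x t ih =>
    intro s
    have hx : PySem.Set.ofList (x :: t) = [x] ++ (PySem.Set.ofList t).filter (fun y => decide (y ∉ [x])) := by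
      rw [PySem.Set.ofList_eq_foldl, List.foldl_cons]
      have : PySem.Set.add ([] : List Int) x = [x] := by simp [PySem.Set.add, PySem.Set.contains]
      rw [this, ih [x]]
    rw [List.foldl_cons, ih (PySem.Set.add s x), hx]
    by_cases hmem : x ∈ s
    · have hadd : PySem.Set.add s x = s := by simp [PySem.Set.add, PySem.Set.contains, hmem]
      rw [hadd]
      congr 1
      rw [List.filter_append]
      have h1 : List.filter (fun y => decide (y ∉ s)) [x] = [] := by simp [hmem]
      rw [h1, List.nil_append, List.filter_filter]
      apply List.filter_congr
      intro y _
      by_cases hy : y ∈ s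
      · simp [hy]
      · have : y ≠ x := fun h => hy (h ▸ hmem)
        simp [hy, this]
    · have hadd : PySem.Set.add s x = s ++ [x] := by simp [PySem.Set.add, PySem.Set.contains, hmem]
      rw [hadd, List.append_assoc]
      congr 1
      rw [List.filter_append]
      have h1 : List.filter (fun y => decide (y ∉ s)) [x] = [x] := by simp [hmem]
      rw [h1, List.filter_filter]
      congr 1
      apply List.filter_congr
      intro y _
      by_cases hy : y = x
      · subst hy; simp
      · by_cases hs : y ∈ s <;> simp [hy, hs]

theorem ofList_cons (x : Int) (xs : List Int) :
    PySem.Set.ofList (x :: xs) = x :: (PySem.Set.ofList xs).filter (fun y => !(y == x)) := by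
  rw [PySem.Set.ofList_eq_foldl, List.foldl_cons]
  have h0 : PySem.Set.add ([] : List Int) x = [x] := by simp [PySem.Set.add, PySem.Set.contains]
  rw [h0, ofList_foldl_add xs [x], List.singleton_append]
  congr 1
  apply List.filter_congr
  intro y _
  by_cases hy : y = x <;> simp [hy]

-- the modes of x :: xs in terms of the modes of xs (m bounds every multiplicity)
theorem modasCons (x : Int) (xs : List Int) (m : Int)
    (h : ∀ y ∈ x :: xs, (((x :: xs).count y : Nat) : Int) ≤ m) :
    (PySem.Set.ofList (x :: xs)).filter (fun y => decide ((((x :: xs).count y : Nat) : Int) = m))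
    = (if (((xs.count x + 1 : Nat)) : Int) = m then [x] else [])
      ++ (PySem.Set.ofList xs).filter (fun y => decide (((xs.count y : Nat) : Int) = m)) := by
  rw [ofList_cons, List.filter_cons]
  have hcx : (x :: xs).count x = xs.count x + 1 := List.count_cons_self
  have hcxlt : ((xs.count x : Nat) : Int) < m := by
    have := h x List.mem_cons_self
    rw [hcx] at this
    push_cast at this ⊢
    omega
  have htail : List.filter (fun y => decide ((((x :: xs).count y : Nat) : Int) = m))
        ((PySem.Set.ofList xs).filter (fun y => !(y == x)))
      = (PySem.Set.ofList xs).filter (fun y => decide (((xs.count y : Nat) : Int) = m)) := by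
    rw [List.filter_filter]
    apply List.filter_congr
    intro y _
    by_cases hy : y = x
    · subst hy
      have : ¬(((xs.count y : Nat) : Int) = m) := ne_of_lt hcxlt
      simp [this]
    · have : (x :: xs).count y = xs.count y := List.count_cons_of_ne (fun h' => hy h'.symm)
      simp [this, hy]
  by_cases hm : (((xs.count x + 1 : Nat)) : Int) = m
  · rw [if_pos hm, if_pos (by rw [hcx]; simpa using hm), htail]
    rfl
  · rw [if_neg hm, if_neg (by rw [hcx]; simpa using hm), htail, List.nil_append]

-- positions of rank m are exactly the first occurrences of elements of multiplicity m,
-- provided m bounds every multiplicity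
theorem firstOcc (l : List Int) (m : Int) (h : ∀ x ∈ l, ((l.count x : Nat) : Int) ≤ m) :
    (PySem.Set.ofList l).filter (fun x => decide (((l.count x : Nat) : Int) = m))
    = levelList m l := by
  induction l with
  | nil => rfl
  | cons x xs ih =>
    have hxs : ∀ y ∈ xs, ((xs.count y : Nat) : Int) ≤ m := by
      intro y hy
      have h1 := h y (List.mem_cons_of_mem _ hy)
      have h2 : xs.count y ≤ (x :: xs).count y := by
        rw [List.count_cons]; omega
      push_cast at h1 ⊢
      omega
    rw [modasCons x xs m h, ih hxs]
    unfold levelList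
    have hzip : List.zip (ranks (x :: xs)) (x :: xs)
        = (((xs.count x + 1 : Nat) : Int), x) :: (ranks xs).zip xs := rfl
    rw [hzip, List.filter_cons]
    by_cases hm : (((xs.count x + 1 : Nat)) : Int) = m
    · rw [if_pos hm, if_pos (by simpa using hm), List.map_cons]
      rfl
    · rw [if_neg hm, if_neg (by simpa using hm), List.nil_append]

-- erasing the first occurrence of each mode keeps exactly the positions of rank ≠ m
theorem eraseFold_cons (ys : List Int) : ∀ (xs : List Int) (x : Int), (∀ y ∈ ys, y ≠ x) →
    ys.foldl (fun l2 y => l2.erase y) (x :: xs) = x :: ys.foldl (fun l2 y => l2.erase y) xs := by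
  induction ys with
  | nil => intro xs x _; rfl
  | cons y t ih =>
    intro xs x hy
    have hyx : y ≠ x := hy y List.mem_cons_self
    rw [List.foldl_cons, List.erase_cons_tail (by simpa using fun h : x = y => hyx h.symm),
      ih _ _ (fun z hz => hy z (List.mem_cons_of_mem _ hz)), List.foldl_cons]

theorem eraseFold_filter (l : List Int) (m : Int) (h : ∀ x ∈ l, ((l.count x : Nat) : Int) ≤ m) :
    ((PySem.Set.ofList l).filter (fun x => decide (((l.count x : Nat) : Int) = m))).foldl
        (fun l2 y => l2.erase y) l
    = ((List.zip (ranks l) l).filter (fun p => !(p.1 == m))).map Prod.snd := by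
  induction l with
  | nil => rfl
  | cons x xs ih =>
    have hxs : ∀ y ∈ xs, ((xs.count y : Nat) : Int) ≤ m := by
      intro y hy
      have h1 := h y (List.mem_cons_of_mem _ hy)
      have h2 : xs.count y ≤ (x :: xs).count y := by rw [List.count_cons]; omega
      push_cast at h1 ⊢
      omega
    rw [modasCons x xs m h]
    have hzip : List.zip (ranks (x :: xs)) (x :: xs)
        = (((xs.count x + 1 : Nat) : Int), x) :: (ranks xs).zip xs := rfl
    rw [hzip, List.filter_cons]
    by_cases hm : (((xs.count x + 1 : Nat)) : Int) = m
    · rw [if_pos hm, List.singleton_append, List.foldl_cons, List.erase_cons_head,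
        ih hxs, if_neg (by simpa using hm)]
    · have hne : ∀ y ∈ (PySem.Set.ofList xs).filter
          (fun y => decide (((xs.count y : Nat) : Int) = m)), y ≠ x := by
        intro y hy
        have hcy : ((xs.count y : Nat) : Int) = m := by
          have := (List.mem_filter.mp hy).2
          simpa using this
        intro hyx
        subst hyx
        have hcx := h y List.mem_cons_self
        rw [List.count_cons_self] at hcx
        push_cast at hcx hcy
        omega
      rw [if_neg hm, List.nil_append, eraseFold_cons _ _ _ hne, ih hxs,
        if_pos (by simpa using hm), List.map_cons]

-- how many occurrences of y survive the removal of the rank-m positions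
theorem countFilterRank (l : List Int) (y : Int) (m : Int) :
    (((List.zip (ranks l) l).filter (fun p => !(p.1 == m))).map Prod.snd).count y
    = l.count y - (if 1 ≤ m ∧ m ≤ ((l.count y : Nat) : Int) then 1 else 0) := by
  induction l with
  | nil => split_ifs <;> rfl
  | cons x t ih =>
    have hzip : List.zip (ranks (x :: t)) (x :: t)
        = (((t.count x + 1 : Nat) : Int), x) :: (ranks t).zip t := rfl
    rw [hzip, List.filter_cons]
    by_cases hxy : x = y
    · subst hxy
      by_cases hm : (((t.count x + 1 : Nat)) : Int) = m
      · rw [if_neg (by simpa using hm)]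
        rw [ih]
        rw [List.count_cons_self]
        have hc : (t.count x : Int) < m := by push_cast at hm ⊢; omega
        rw [if_neg (by omega)]
        rw [if_pos (by constructor <;> [skip; push_cast] <;> omega)]
        omega
      · rw [if_pos (by simpa using hm), List.map_cons, List.count_cons_self, ih,
          List.count_cons_self]
        split_ifs with h1 h2 <;> push_cast at * <;> omega
    · have hcy : (x :: t).count y = t.count y := List.count_cons_of_ne hxy
      rw [hcy]
      by_cases hk : !((((t.count x + 1 : Nat) : Int)) == m)
      · rw [if_pos hk, List.map_cons, List.count_cons_of_ne hxy, ih]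
      · rw [if_neg hk, ih]

-- removing the rank-m positions leaves every remaining rank unchanged
theorem ranksFilter (l : List Int) (m : Int) (h : ∀ x ∈ l, ((l.count x : Nat) : Int) ≤ m) :
    List.zip (ranks (((List.zip (ranks l) l).filter (fun p => !(p.1 == m))).map Prod.snd))
             (((List.zip (ranks l) l).filter (fun p => !(p.1 == m))).map Prod.snd)
    = (List.zip (ranks l) l).filter (fun p => !(p.1 == m)) := by
  induction l with
  | nil => rfl
  | cons x xs ih =>
    have hxs : ∀ y ∈ xs, ((xs.count y : Nat) : Int) ≤ m := by
      intro y hy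
      have h1 := h y (List.mem_cons_of_mem _ hy)
      have h2 : xs.count y ≤ (x :: xs).count y := by rw [List.count_cons]; omega
      push_cast at h1 ⊢
      omega
    have hzip : List.zip (ranks (x :: xs)) (x :: xs)
        = (((xs.count x + 1 : Nat) : Int), x) :: (ranks xs).zip xs := rfl
    rw [hzip, List.filter_cons]
    by_cases hm : (((xs.count x + 1 : Nat)) : Int) = m
    · rw [if_neg (by simpa using hm)]
      exact ih hxs
    · rw [if_pos (by simpa using hm), List.map_cons]
      have hlt : ((xs.count x : Nat) : Int) < m := by
        have := h x List.mem_cons_self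
        rw [List.count_cons_self] at this
        push_cast at this ⊢
        omega
      have hcx : ((((List.zip (ranks xs) xs).filter (fun p => !(p.1 == m))).map Prod.snd).count x)
          = xs.count x := by
        rw [countFilterRank, if_neg (by omega)]
        omega
      have hzip2 : List.zip
          (ranks (x :: ((List.zip (ranks xs) xs).filter (fun p => !(p.1 == m))).map Prod.snd))
          (x :: ((List.zip (ranks xs) xs).filter (fun p => !(p.1 == m))).map Prod.snd)
          = ((((((List.zip (ranks xs) xs).filter (fun p => !(p.1 == m))).map Prod.snd).count x
                + 1 : Nat) : Int), x)
            :: List.zip (ranks (((List.zip (ranks xs) xs).filter (fun p => !(p.1 == m))).map Prod.snd))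
                 (((List.zip (ranks xs) xs).filter (fun p => !(p.1 == m))).map Prod.snd) := rfl
    -- assemble head and tail
      rw [hzip2, hcx, ih hxs]

theorem firstRank_mem (l : List Int) (x : Int) (hx : x ∈ l) :
    (((l.count x : Nat) : Int), x) ∈ List.zip (ranks l) l := by
  induction l with
  | nil => cases hx
  | cons y t ih =>
    have hzip : List.zip (ranks (y :: t)) (y :: t)
        = (((t.count y + 1 : Nat) : Int), y) :: (ranks t).zip t := rfl
    rw [hzip]
    by_cases hxy : x = y
    · subst hxy
      rw [List.count_cons_self]
      exact List.mem_cons_self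
    · have : (y :: t).count x = t.count x := List.count_cons_of_ne (fun h => hxy h.symm)
      rw [this]
      exact List.mem_cons_of_mem _ (ih (by rcases List.mem_cons.mp hx with h | h; exact absurd h hxy; exact h))

-- the maximal multiplicity drops by exactly one after a peeling round
theorem maxCount_after (l : List Int) (hl : l ≠ []) :
    maxCount (((List.zip (ranks l) l).filter (fun p => !(p.1 == (maxCount l : Int)))).map Prod.snd)
    = maxCount l - 1 := by
  have hM1 : 1 ≤ maxCount l := maxCount_pos l hl
  have hle : maxCount (((List.zip (ranks l) l).filter
      (fun p => !(p.1 == (maxCount l : Int)))).map Prod.snd) ≤ maxCount l - 1 := by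
    apply maxCount_le
    intro y hy
    have hyl : y ∈ l := by
      obtain ⟨p, hp, rfl⟩ := List.mem_map.mp hy
      exact (List.of_mem_zip (List.mem_filter.mp hp).1).2
    have hcle : l.count y ≤ maxCount l := count_le_maxCount l y hyl
    rw [countFilterRank l y (maxCount l : Int)]
    split_ifs with hcond
    · omega
    · push_cast at hcond
      omega
  obtain ⟨x, hx, hxc⟩ := maxCount_attained l hl
  have hcx : (((List.zip (ranks l) l).filter
      (fun p => !(p.1 == (maxCount l : Int)))).map Prod.snd).count x = maxCount l - 1 := by
    rw [countFilterRank l x (maxCount l : Int), hxc, if_pos (by omega)]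
  by_cases h1 : maxCount l = 1
  · omega
  · have hxl' : x ∈ ((List.zip (ranks l) l).filter
        (fun p => !(p.1 == (maxCount l : Int)))).map Prod.snd :=
      List.one_le_count_iff.mp (by omega)
    have := count_le_maxCount _ x hxl'
    omega

theorem levelList_after (l : List Int) (m ℓ : Int) (hm : ∀ x ∈ l, ((l.count x : Nat) : Int) ≤ m)
    (hne : ℓ ≠ m) :
    levelList ℓ (((List.zip (ranks l) l).filter (fun p => !(p.1 == m))).map Prod.snd)
    = levelList ℓ l := by
  unfold levelList
  rw [ranksFilter l m hm, List.filter_filter]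
  congr 1
  apply List.filter_congr
  intro p _
  by_cases hp : p.1 = ℓ
  · simp [hp, hne]
  · simp [hp]

theorem pv_foldl_max_eq_maxD (f : Int → Int) (l : List Int) (hf : ∀ x ∈ l, 0 ≤ f x) :
    l.foldl (fun acc x => max acc (f x)) 0
    = (PySem.List.max? ((PySem.Set.ofList l).map f) (fun v => v)).getD 0 := by
  cases hl : ((PySem.Set.ofList l).map f) with
  | nil =>
    have hnil : l = [] := by
      cases l with
      | nil => rfl
      | cons a t =>
        exfalso
        have ha : a ∈ PySem.Set.ofList (a :: t) := (PySem.Set.mem_ofList _ _).mpr (by simp)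
        have : f a ∈ (PySem.Set.ofList (a :: t)).map f := List.mem_map_of_mem ha
        rw [hl] at this
        exact absurd this (List.not_mem_nil)
    subst hnil
    simp [PySem.List.max?]
  | cons b u =>
    rw [PySem.List.max?_id_cons, Option.getD_some]
    have hmax? : PySem.List.max? (b :: u) (fun y => y) = some (u.foldl max b) :=
      PySem.List.max?_id_cons b u
    have hBmem : u.foldl max b ∈ (b :: u) := by
      rcases PySem.List.foldl_max_mem u b with h | h
      · simp [h]
      · exact List.mem_cons_of_mem _ h
    have hBset : u.foldl max b ∈ (PySem.Set.ofList l).map f := by rw [hl]; exact hBmem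
    obtain ⟨y, hy, hyB⟩ := List.mem_map.mp hBset
    have hyl : y ∈ l := (PySem.Set.mem_ofList _ _).mp hy
    have hBnn : (0 : Int) ≤ u.foldl max b := hyB ▸ hf y hyl
    apply le_antisymm
    · have hA : (l.map f).foldl max 0 = l.foldl (fun acc x => max acc (f x)) 0 :=
        List.foldl_map
      rw [← hA]
      rcases PySem.List.foldl_max_mem (l.map f) 0 with h | h
      · rw [h]; exact hBnn
      · obtain ⟨x, hx, hfx⟩ := List.mem_map.mp h
        have hxs : f x ∈ (PySem.Set.ofList l).map f :=
          List.mem_map_of_mem ((PySem.Set.mem_ofList _ _).mpr hx)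
        rw [hl] at hxs
        rw [← hfx]
        exact PySem.List.max?_isMax hmax? _ hxs
    · rw [← hyB]
      exact (PySem.List.le_foldl_max_int l f 0).2 y hyl

theorem pv_max_eq (l : List Int) :
    l.foldl (fun contadorModal ramo =>
      let conteo : Int := (PySem.List.count l ramo : Int)
      if conteo > contadorModal then conteo else contadorModal) 0
    = (PySem.List.max? ((PySem.Dict.counter l : PySem.Dict Int Int).values) (fun v => v)).getD 0 := by
  have h1 : l.foldl (fun contadorModal ramo =>
      let conteo : Int := (PySem.List.count l ramo : Int)
      if conteo > contadorModal then conteo else contadorModal) 0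
      = l.foldl (fun acc x => max acc ((List.count x l : Nat) : Int)) 0 := by
    apply PySem.List.foldl_congr_mem
    intro acc x hx
    simp only [PySem.List.count_eq]
    rcases le_or_gt ((List.count x l : Nat) : Int) acc with h | h
    · simp [not_lt.mpr h, max_eq_left h]
    · simp [h, max_eq_right (le_of_lt h)]
  have h2 : (PySem.Dict.counter l : PySem.Dict Int Int).values
      = (PySem.Set.ofList l).map (fun x => ((List.count x l : Nat) : Int)) := by
    show ((PySem.Dict.counter l : PySem.Dict Int Int).items).map Prod.snd = _
    rw [PySem.Dict.items_counter]
    simp [List.map_map, Function.comp]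
  rw [h1, h2, pv_foldl_max_eq_maxD]
  intro x _
  positivity

-- B's reverse pass computes the counter of the reversed list and the rank labels
theorem revpass (l : List Int) :
    l.reverse.foldl (fun (st : PySem.Dict Int Int × List Int) x =>
      let r := st.1.getD x 0 + 1
      (st.1.insert x r, st.2 ++ [r])) ((PySem.Dict.empty : PySem.Dict Int Int), ([] : List Int))
    = (PySem.Dict.counter l.reverse, (ranks l).reverse) := by
  induction l with
  | nil => rfl
  | cons x xs ih =>
    rw [List.reverse_cons, List.foldl_append, ih, List.foldl_cons, List.foldl_nil]
    refine Prod.ext ?_ ?_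
    · show (PySem.Dict.counter xs.reverse).insert x
        ((PySem.Dict.counter xs.reverse).getD x 0 + 1) = PySem.Dict.counter (xs.reverse ++ [x])
      rw [← PySem.Dict.foldl_insert_getD_add_one_eq_counter xs.reverse,
        ← PySem.Dict.foldl_insert_getD_add_one_eq_counter (xs.reverse ++ [x]),
        List.foldl_append, List.foldl_cons, List.foldl_nil]
    · show (ranks xs).reverse ++ [(PySem.Dict.counter xs.reverse).getD x 0 + 1]
        = (ranks (x :: xs)).reverse
      rw [PySem.Dict.getD_counter, List.count_reverse]
      show _ = (((xs.count x + 1 : Nat) : Int) :: ranks xs).reverse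
      rw [List.reverse_cons]
      push_cast
      rfl

-- A's guarded remove is List.erase
theorem eraseStep_eq (l2 : List Int) (r : Int) :
    (if r ∈ l2 then (PySem.List.remove? l2 r).getD l2 else l2) = l2.erase r := by
  by_cases h : r ∈ l2
  · rw [if_pos h, PySem.List.remove?_eq_some_erase l2 r h, Option.getD_some]
  · rw [if_neg h, List.erase_of_not_mem h]

def stepA (st : List Int × List Int) : List Int × List Int :=
  (st.1 ++ calcularModa st.2, (calcularModa st.2).foldl (fun l2 r => l2.erase r) st.2)

-- a fold that ignores its elements only depends on the length
theorem pv_foldl_ignore_len {α β σ : Type} (f : σ → σ) :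
    ∀ (l : List α) (r : List β), l.length = r.length → ∀ init : σ,
      l.foldl (fun s _ => f s) init = r.foldl (fun s _ => f s) init := by
  intro l
  induction l with
  | nil =>
    intro r h init
    cases r with
    | nil => rfl
    | cons b t => simp at h
  | cons a t ih =>
    intro r h init
    cases r with
    | nil => simp at h
    | cons b u => simp only [List.foldl_cons]; exact ih u (by simpa using h) _

theorem peelCat_step (l : List Int) (hl : l ≠ []) :
    peelCat l = calcularModa l
      ++ peelCat (((List.zip (ranks l) l).filter (fun p => !(p.1 == (maxCount l : Int)))).map Prod.snd) := by
  have hcnt : ∀ x ∈ l, ((l.count x : Nat) : Int) ≤ (maxCount l : Int) := fun x hx => by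
    exact_mod_cast count_le_maxCount l x hx
  have hmoda : calcularModa l = levelList (maxCount l : Int) l := by
    rw [modaOfList, firstOcc l _ hcnt]
  have hM : maxCount l = (maxCount l - 1) + 1 := by
    have := maxCount_pos l hl
    omega
  unfold peelCat
  rw [maxCount_after l hl]
  conv_lhs => rw [hM]
  rw [show descList ((maxCount l - 1) + 1)
      = ((((maxCount l - 1) + 1 : Nat)) : Int) :: descList (maxCount l - 1) from rfl]
  rw [List.flatMap_cons]
  congr 1
  · rw [hmoda]
    congr 1
    rw [← hM]
  · apply List.flatMap_congr
    intro m hm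
    have hmle := (mem_descList _ m).mp hm
    have hne : m ≠ (maxCount l : Int) := by
      have : ((maxCount l - 1 : Nat) : Int) < (maxCount l : Int) := by omega
      omega
    exact (levelList_after l (maxCount l : Int) m hcnt hne).symm

theorem iterA : ∀ (k : Nat) (l pr : List Int), l.length ≤ k →
    ((List.replicate k (0 : Nat)).foldl (fun st _ => stepA st) (pr, l)).1 = pr ++ peelCat l := by
  intro k
  induction k with
  | zero =>
    intro l pr h
    have hnil : l = [] := List.eq_nil_of_length_eq_zero (Nat.le_zero.mp h)
    subst hnil
    simp [peelCat, maxCount, descList]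
  | succ n ih =>
    intro l pr h
    rw [List.replicate_succ, List.foldl_cons]
    by_cases hl : l = []
    · subst hl
      have hstep : stepA (pr, ([] : List Int)) = (pr, ([] : List Int)) := by
        have hm : calcularModa [] = [] := rfl
        simp [stepA, hm]
      rw [hstep, ih [] pr (by simp)]
    · have hcnt : ∀ x ∈ l, ((l.count x : Nat) : Int) ≤ (maxCount l : Int) := fun x hx => by
        exact_mod_cast count_le_maxCount l x hx
      have herase : (calcularModa l).foldl (fun l2 r => l2.erase r) l
          = ((List.zip (ranks l) l).filter (fun p => !(p.1 == (maxCount l : Int)))).map Prod.snd := by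
        rw [modaOfList]
        exact eraseFold_filter l (maxCount l : Int) hcnt
      have hlen : (((List.zip (ranks l) l).filter
          (fun p => !(p.1 == (maxCount l : Int)))).map Prod.snd).length ≤ n := by
        obtain ⟨x, hx, hxc⟩ := maxCount_attained l hl
        have hmem : (((maxCount l : Nat) : Int), x) ∈ List.zip (ranks l) l := by
          rw [← hxc]
          exact firstRank_mem l x hx
        have hflt : ((List.zip (ranks l) l).filter
            (fun p => !(p.1 == (maxCount l : Int)))).length < (List.zip (ranks l) l).length :=
          List.length_filter_lt_length_iff_exists.mpr ⟨_, hmem, by simp⟩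
        have hzlen : (List.zip (ranks l) l).length ≤ l.length := by
          rw [List.length_zip]
          omega
        rw [List.length_map]
        omega
      have hstep : stepA (pr, l) = (pr ++ calcularModa l,
          ((List.zip (ranks l) l).filter (fun p => !(p.1 == (maxCount l : Int)))).map Prod.snd) := by
        rw [stepA, herase]
      rw [hstep, ih _ _ hlen, peelCat_step l hl, List.append_assoc]

theorem A_eq_peelCat (l : List Int) : calcularPrioridad l = peelCat l := by
  unfold calcularPrioridad
  simp only [PySem.List.foldl_append_singleton_eq_self, List.nil_append]
  have hfun : (fun (st : List Int × List Int) (_ : Nat) =>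
      (st.1 ++ calcularModa st.2,
       (calcularModa st.2).foldl (fun lista2 ramo =>
         if ramo ∈ lista2 then (PySem.List.remove? lista2 ramo).getD lista2 else lista2) st.2))
      = (fun (st : List Int × List Int) (_ : Nat) => stepA st) := by
    funext st i
    unfold stepA
    refine congrArg₂ _ rfl ?_
    apply PySem.List.foldl_congr_mem
    intro acc x _
    exact eraseStep_eq acc x
  rw [hfun, pv_foldl_ignore_len (f := stepA) (List.range l.length)
    (List.replicate l.length (0 : Nat)) (by simp), iterA l.length l [] (le_refl _),
    List.nil_append]

theorem B_eq_peelCat (l : List Int) : calcularPrioridad_alt l = peelCat l := by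
  unfold calcularPrioridad_alt
  rw [revpass]
  simp only [List.reverse_reverse]
  have hmax : (PySem.List.max? ((PySem.Dict.counter l.reverse : PySem.Dict Int Int).values)
      (fun v => v)).getD 0 = ((maxCount l : Nat) : Int) := by
    rw [← pv_max_eq l.reverse, runmax_eq l.reverse, maxCount_reverse]
  rw [hmax, pyRange_downto, PySem.List.foldl_append_eq_flatMap, List.nil_append]
  rfl

-- ===== VERDICT (by name: the statement is the Claim_ definition above) =====
theorem calcularPrioridad_spec : Claim_equal_calcularPrioridad := by
  intro lista _
  unfold Spec_calcularPrioridad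
  rw [A_eq_peelCat, B_eq_peelCat]
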